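-- pv_equiv track=rewrite | github.com/pypi-data/pypi-mirror-390 | packages/dodgem/dodgem-1.3.2-py3-none-any.whl/dodgem/dodgem.py | from_pep_440_token
-- ===== SOURCE A (Python) =====
-- def from_pep_440_token(token):
--     """Transforms a PEP-440 compatible version string token into a regular semver string token.
--
--     Args:
--         token (str): The token to transform.
--     Returns:
--         str: The transformed token.
--     """
--     chars = []
--     dotted = False
--     for c in token:
--         if c.isdigit() and not dotted:
--             chars.append(".")
--             dotted = True
--         chars.append(c)
--     return "".join(chars)
-- ===== SOURCE B (Python) =====
-- def from_pep_440_token(token):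
--     """Transforms a PEP-440 compatible version string token into a regular semver string token."""
--     i = next((i for i, c in enumerate(token) if c.isdigit()), None)
--     if i is None:
--         return token
--     return token[:i] + "." + token[i:]
-- ===== Notes on version B (the rewrite author's own statement) =====
-- stated objective: simpler
-- what changed: Replaces the incremental char-list build with a seen-digit sentinel flag by a locate-then-construct decomposition: find the index of the first digit, then splice the string around it.
import Mathlib
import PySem

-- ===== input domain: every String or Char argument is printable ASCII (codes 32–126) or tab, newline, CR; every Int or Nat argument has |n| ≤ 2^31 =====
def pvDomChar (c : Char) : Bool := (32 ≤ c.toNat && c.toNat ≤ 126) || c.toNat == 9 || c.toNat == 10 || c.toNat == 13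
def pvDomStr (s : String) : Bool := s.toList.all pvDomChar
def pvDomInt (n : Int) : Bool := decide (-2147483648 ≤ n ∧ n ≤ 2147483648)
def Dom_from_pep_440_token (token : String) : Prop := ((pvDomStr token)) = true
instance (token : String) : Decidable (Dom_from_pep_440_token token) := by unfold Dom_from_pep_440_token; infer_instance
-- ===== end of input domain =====

-- ===== PORT A =====
-- loop body of A as a named helper
def pvStepA (st : List Char × Bool) (c : Char) : List Char × Bool :=
  let st := if PySem.Chars.isdigit c && !st.2 then (st.1 ++ ['.'], true) else st
  (st.1 ++ [c], st.2)

-- B inserts '.' before the first digit by slicing instead of A's char-by-char build with a sentinel flag.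
def from_pep_440_token (token : String) : String :=
  String.ofList (token.toList.foldl pvStepA ([], false)).1

-- ===== PORT B =====
def from_pep_440_token_alt (token : String) : String :=
  match token.toList.findIdx? PySem.Chars.isdigit with
  | none => token
  | some i => String.ofList (token.toList.take i ++ '.' :: token.toList.drop i)

-- ===== PRECONDITION & SPEC =====
def Spec_from_pep_440_token (token : String) (out : String) : Prop := out = from_pep_440_token_alt token
instance (token : String) (out : String) : Decidable (Spec_from_pep_440_token token out) := by unfold Spec_from_pep_440_token; infer_instance

-- ===== CLAIM (what is proved, stated in full; the proofs are below) =====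
def Claim_equal_from_pep_440_token : Prop := ∀ (token : String), Dom_from_pep_440_token token → Spec_from_pep_440_token token (from_pep_440_token token)

-- ===== LEMMAS AND PROOFS =====

-- ===== VERDICT (by name: the statement is the Claim_ definition above) =====
theorem pvFoldA_true (cs : List Char) : ∀ acc : List Char,
    cs.foldl pvStepA (acc, true) = (acc ++ cs, true) := by
  induction cs with
  | nil => simp [List.foldl]
  | cons c cs ih =>
    intro acc
    simp [List.foldl, pvStepA, ih]

theorem pvFoldA_false (cs : List Char) : ∀ acc : List Char,
    (cs.foldl pvStepA (acc, false)).1 =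
      acc ++ (match cs.findIdx? PySem.Chars.isdigit with
              | none => cs
              | some i => cs.take i ++ '.' :: cs.drop i) := by
  induction cs with
  | nil => simp [List.foldl]
  | cons c cs ih =>
    intro acc
    by_cases h : PySem.Chars.isdigit c = true
    · simp [List.foldl, pvStepA, h, pvFoldA_true, List.findIdx?_cons]
    · have hstep : pvStepA (acc, false) c = (acc ++ [c], false) := by
        simp [pvStepA, h]
      simp only [List.foldl, hstep, ih, List.findIdx?_cons, h]
      cases hf : cs.findIdx? PySem.Chars.isdigit <;> simp

theorem from_pep_440_token_spec : Claim_equal_from_pep_440_token := by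
  intro token _
  unfold Spec_from_pep_440_token from_pep_440_token from_pep_440_token_alt
  rw [pvFoldA_false token.toList []]
  cases hf : token.toList.findIdx? PySem.Chars.isdigit with
  | none => simp
  | some i => simp
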